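-- pv_equiv track=rewrite | github.com/alifuaziz/multiple_clocks_repo | mc/analyse/analyse_MRI_behav.py | subpath_files
-- ===== SOURCE A (Python) =====
-- def subpath_files(configs, subpath_after_steps, rew_list, rew_index, steps_subpath_alltasks):
--     """
--     Function construction the subpath_after_steps dictionary
--
--
--     :returns steps_subpath_alltasks: dict of lists of lists for each task config
--         - list of lists of the number of steps taken between each reward for each repeat of the task config
--         i.e.[[4, 2, 3, 5],
--              [4, 2, 3, 3],
--              [4, 2, 3, 3],
--              [4, 2, 3, 3],
--              [6, 2, 3, 3]]
--         is the number of steps taken between each reward (coin) for each of the 5 repeats of the task 'C1_forw'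
--     """
--
--
--     for config in configs:
--         rew_list[config] = [[int(value) for value in sub_list] for sub_list in rew_list[config][0:4]]
--         # next step: create subpath files with rew_index and how many steps there are per subpath.
--
--         # if task is completed
--         if (len(subpath_after_steps[config])%4) == 0:
--             for r in range(0, len(subpath_after_steps[config]), 4):
--                 subpath = subpath_after_steps[config][r:r+4]
--                 steps = [subpath[j] - subpath[j-1] for j in range(1,4)]
--                 if r == 0:
--                     steps.insert(0, rew_index[config][r])
--                 if r > 0:
--                     steps.insert(0, (subpath[0]- subpath_after_steps[config][r-1]))
--                 steps_subpath_alltasks[config].append(steps)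
--         # if task not completed
--         elif (len(subpath_after_steps[config])%4) > 0:
--             completed_tasks = len(subpath_after_steps[config])-(len(subpath_after_steps[config])%4)
--             for r in range(0, completed_tasks, 4):
--                 subpath = subpath_after_steps[config][r:r+4]
--                 steps = [subpath[j] - subpath[j-1] for j in range(1,4)]
--                 if r == 0:
--                     steps.insert(0, rew_index[config][r])
--                 if r > 0:
--                     steps.insert(0, (subpath[0]- subpath_after_steps[config][r-1]))
--                 steps_subpath_alltasks[config].append(steps)
--
--     return steps_subpath_alltasks
-- ===== SOURCE B (Python) =====
-- def subpath_files(configs, subpath_after_steps, rew_list, rew_index, steps_subpath_alltasks):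
--     for config in configs:
--         rew_list[config] = [[int(v) for v in sub] for sub in rew_list[config][0:4]]
--         arr = subpath_after_steps[config]
--         completed = len(arr) - len(arr) % 4
--         if completed:
--             # one flat adjacent-difference pass, then reshape into groups of 4
--             e = [rew_index[config][0]] + [arr[i] - arr[i - 1] for i in range(1, completed)]
--             steps_subpath_alltasks[config].extend(e[r:r + 4] for r in range(0, completed, 4))
--     return steps_subpath_alltasks
-- ===== Notes on version B (the rewrite author's own statement) =====
-- stated objective: simpler
-- what changed: B collapses A's duplicated %4==0 / %4>0 branches and per-group insert(0,...) logic into one flat adjacent-difference pass over the step list followed by reshaping it into chunks of 4.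
import Mathlib
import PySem

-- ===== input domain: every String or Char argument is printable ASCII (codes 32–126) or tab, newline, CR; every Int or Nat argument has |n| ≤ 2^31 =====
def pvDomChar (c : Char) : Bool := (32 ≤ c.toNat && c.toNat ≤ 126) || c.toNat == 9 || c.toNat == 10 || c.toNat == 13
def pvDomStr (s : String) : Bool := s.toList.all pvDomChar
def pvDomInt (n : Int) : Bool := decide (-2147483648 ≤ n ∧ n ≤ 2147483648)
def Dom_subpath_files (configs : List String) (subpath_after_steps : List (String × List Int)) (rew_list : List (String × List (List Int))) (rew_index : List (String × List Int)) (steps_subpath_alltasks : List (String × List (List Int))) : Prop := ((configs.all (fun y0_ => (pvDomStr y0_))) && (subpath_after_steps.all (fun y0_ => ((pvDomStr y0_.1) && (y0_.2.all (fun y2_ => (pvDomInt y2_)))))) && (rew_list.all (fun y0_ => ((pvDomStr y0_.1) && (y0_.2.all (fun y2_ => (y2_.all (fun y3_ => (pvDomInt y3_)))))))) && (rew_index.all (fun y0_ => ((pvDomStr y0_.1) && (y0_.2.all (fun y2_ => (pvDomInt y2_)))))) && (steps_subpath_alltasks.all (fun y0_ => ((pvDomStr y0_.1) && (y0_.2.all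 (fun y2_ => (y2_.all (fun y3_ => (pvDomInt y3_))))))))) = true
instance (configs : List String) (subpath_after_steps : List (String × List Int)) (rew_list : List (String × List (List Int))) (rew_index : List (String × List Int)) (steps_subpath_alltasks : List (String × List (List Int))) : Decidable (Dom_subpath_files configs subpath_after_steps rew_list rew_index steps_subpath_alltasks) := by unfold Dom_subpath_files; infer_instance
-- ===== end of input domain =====

-- B replaces A's duplicated %4==0 / %4>0 per-group insert loops by one flat adjacent-difference
-- pass followed by reshaping into chunks of 4 (objective: simpler; same O(n) cost).
-- Note: the Python functions mutate rew_list and steps_subpath_alltasks in place; both A and B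
-- perform identical mutations, and the equivalence proved here is about the return value.

-- ===== PORT A =====
def subpath_files (configs : List String) (subpath_after_steps : List (String × List Int)) (rew_list : List (String × List (List Int))) (rew_index : List (String × List Int)) (steps_subpath_alltasks : List (String × List (List Int))) : List (String × List (List Int)) :=
  (configs.foldl
    (fun (s : PySem.Dict String (List (List Int)) × PySem.Dict String (List (List Int))) config =>
      -- rew_list[config] = [[int(value) for value in sub_list] for sub_list in rew_list[config][0:4]]
      let rlD := s.1.insert config
        ((PySem.List.slice (s.1.getD config []) (some 0) (some 4)).map (fun sub => sub.map (fun v => v)))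
      let arr := (PySem.Dict.mk subpath_after_steps).getD config []
      let n : Int := arr.length
      let stD :=
        if PySem.Int.mod n 4 = 0 then
          -- for r in range(0, len(...), 4): build `steps` and append
          (PySem.List.pyRange 0 n 4).foldl
            (fun st r =>
              let subpath := PySem.List.slice arr (some r) (some (r + 4))
              let steps := (PySem.List.pyRange 1 4 1).map (fun j =>
                PySem.List.pyGetD subpath j 0 - PySem.List.pyGetD subpath (j - 1) 0)
              let steps := if r = 0 then PySem.List.pyGetD ((PySem.Dict.mk rew_index).getD config []) r 0 :: steps else steps
              let steps := if r > 0 then (PySem.List.pyGetD subpath 0 0 - PySem.List.pyGetD arr (r - 1) 0) :: steps else steps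
              st.modify config [] (fun l => l ++ [steps])) s.2
        else if PySem.Int.mod n 4 > 0 then
          -- completed_tasks = len(...) - len(...)%4 ; same loop body, duplicated as in the Python
          (PySem.List.pyRange 0 (n - PySem.Int.mod n 4) 4).foldl
            (fun st r =>
              let subpath := PySem.List.slice arr (some r) (some (r + 4))
              let steps := (PySem.List.pyRange 1 4 1).map (fun j =>
                PySem.List.pyGetD subpath j 0 - PySem.List.pyGetD subpath (j - 1) 0)
              let steps := if r = 0 then PySem.List.pyGetD ((PySem.Dict.mk rew_index).getD config []) r 0 :: steps else steps
              let steps := if r > 0 then (PySem.List.pyGetD subpath 0 0 - PySem.List.pyGetD arr (r - 1) 0) :: steps else steps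
              st.modify config [] (fun l => l ++ [steps])) s.2
        else s.2
      (rlD, stD))
    (PySem.Dict.mk rew_list, PySem.Dict.mk steps_subpath_alltasks)).2.items

-- ===== PORT B =====
def subpath_files_alt (configs : List String) (subpath_after_steps : List (String × List Int)) (rew_list : List (String × List (List Int))) (rew_index : List (String × List Int)) (steps_subpath_alltasks : List (String × List (List Int))) : List (String × List (List Int)) :=
  (configs.foldl
    (fun (s : PySem.Dict String (List (List Int)) × PySem.Dict String (List (List Int))) config =>
      let rlD := s.1.insert config
        ((PySem.List.slice (s.1.getD config []) (some 0) (some 4)).map (fun sub => sub.map (fun v => v)))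
      let arr := (PySem.Dict.mk subpath_after_steps).getD config []
      let completed : Int := (arr.length : Int) - PySem.Int.mod (arr.length : Int) 4
      let stD :=
        if completed ≠ 0 then
          -- one flat adjacent-difference pass ...
          let e := PySem.List.pyGetD ((PySem.Dict.mk rew_index).getD config []) 0 0 ::
            (PySem.List.pyRange 1 completed 1).map (fun i =>
              PySem.List.pyGetD arr i 0 - PySem.List.pyGetD arr (i - 1) 0)
          -- ... then reshape into chunks of 4
          s.2.modify config [] (fun l =>
            l ++ (PySem.List.pyRange 0 completed 4).map (fun r => PySem.List.slice e (some r) (some (r + 4))))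
        else s.2
      (rlD, stD))
    (PySem.Dict.mk rew_list, PySem.Dict.mk steps_subpath_alltasks)).2.items

-- ===== PRECONDITION & SPEC =====
-- Pre_ excludes exactly the inputs where the Python raises: a config missing from rew_list or
-- subpath_after_steps (KeyError), and — when at least one repeat is completed (≥ 4 steps) — a config
-- missing from steps_subpath_alltasks (KeyError) or with an absent/empty rew_index entry
-- (KeyError/IndexError on rew_index[config][0]).
def Pre_subpath_files (configs : List String) (subpath_after_steps : List (String × List Int)) (rew_list : List (String × List (List Int))) (rew_index : List (String × List Int)) (steps_subpath_alltasks : List (String × List (List Int))) : Prop :=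
  ∀ config ∈ configs,
    (PySem.Dict.mk rew_list).contains config = true ∧
    (PySem.Dict.mk subpath_after_steps).contains config = true ∧
    (4 ≤ ((PySem.Dict.mk subpath_after_steps).getD config []).length →
      (PySem.Dict.mk steps_subpath_alltasks).contains config = true ∧
      (PySem.Dict.mk rew_index).getD config [] ≠ [])
instance (configs : List String) (subpath_after_steps : List (String × List Int)) (rew_list : List (String × List (List Int))) (rew_index : List (String × List Int)) (steps_subpath_alltasks : List (String × List (List Int))) : Decidable (Pre_subpath_files configs subpath_after_steps rew_list rew_index steps_subpath_alltasks) := by unfold Pre_subpath_files; infer_instance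

def pvWitness_subpath_files : List String × (List (String × List Int)) × (List (String × List (List Int))) × (List (String × List Int)) × (List (String × List (List Int))) :=
  (["a"], [("a", [1, 3, 4, 8, 9])], [("a", [[1, 2]])], [("a", [2])], [("a", [])])

def Spec_subpath_files (configs : List String) (subpath_after_steps : List (String × List Int)) (rew_list : List (String × List (List Int))) (rew_index : List (String × List Int)) (steps_subpath_alltasks : List (String × List (List Int))) (out : List (String × List (List Int))) : Prop := out = subpath_files_alt configs subpath_after_steps rew_list rew_index steps_subpath_alltasks
instance (configs : List String) (subpath_after_steps : List (String × List Int)) (rew_list : List (String × List (List Int))) (rew_index : List (String × List Int)) (steps_subpath_alltasks : List (String × List (List Int))) (out : List (String × List (List Int))) : Decidable (Spec_subpath_files configs subpath_after_steps rew_list rew_index steps_subpath_alltasks out) := by unfold Spec_subpath_files; infer_instance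

-- ===== CLAIM (what is proved, stated in full; the proofs are below) =====
def Claim_equal_subpath_files : Prop := ∀ (configs : List String) (subpath_after_steps : List (String × List Int)) (rew_list : List (String × List (List Int))) (rew_index : List (String × List Int)) (steps_subpath_alltasks : List (String × List (List Int))), Dom_subpath_files configs subpath_after_steps rew_list rew_index steps_subpath_alltasks → Pre_subpath_files configs subpath_after_steps rew_list rew_index steps_subpath_alltasks → Spec_subpath_files configs subpath_after_steps rew_list rew_index steps_subpath_alltasks (subpath_files configs subpath_after_steps rew_list rew_index steps_subpath_alltasks)

-- ===== LEMMAS AND PROOFS =====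

-- the per-repeat group of A, and the flat difference list of B, as proof-side names
def pvGroup (arr rew : List Int) (r : Int) : List Int :=
  let subpath := PySem.List.slice arr (some r) (some (r + 4))
  let steps := (PySem.List.pyRange 1 4 1).map (fun j =>
    PySem.List.pyGetD subpath j 0 - PySem.List.pyGetD subpath (j - 1) 0)
  let steps := if r = 0 then PySem.List.pyGetD rew r 0 :: steps else steps
  let steps := if r > 0 then (PySem.List.pyGetD subpath 0 0 - PySem.List.pyGetD arr (r - 1) 0) :: steps else steps
  steps

def pvE (arr rew : List Int) (completed : Int) : List Int :=
  PySem.List.pyGetD rew 0 0 ::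
    (PySem.List.pyRange 1 completed 1).map (fun i =>
      PySem.List.pyGetD arr i 0 - PySem.List.pyGetD arr (i - 1) 0)

lemma pv_modify_modify (d : PySem.Dict String (List (List Int))) (c : String) (a b : List (List Int)) :
    (d.modify c [] (fun l => l ++ a)).modify c [] (fun l => l ++ b)
      = d.modify c [] (fun l => l ++ (a ++ b)) := by
  simp only [PySem.Dict.modify, PySem.Dict.getD_insert_self, PySem.Dict.insert_insert_self,
    List.append_assoc]

lemma pv_foldl_modify (c : String) (g : Int → List Int) :
    ∀ (rs : List Int) (st : PySem.Dict String (List (List Int))), rs ≠ [] →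
      rs.foldl (fun s r => s.modify c [] (fun l => l ++ [g r])) st
        = st.modify c [] (fun l => l ++ rs.map g)
  | [], _, h => absurd rfl h
  | r :: rs, st, _ => by
    cases rs with
    | nil => simp
    | cons r' rs' =>
      rw [List.foldl_cons, pv_foldl_modify c g (r' :: rs') _ (by simp), pv_modify_modify]
      simp

lemma pv_take4_drop (xs : List Int) (m : Nat) (h : m + 4 ≤ xs.length) :
    (xs.drop m).take 4 = [xs.getD m 0, xs.getD (m+1) 0, xs.getD (m+2) 0, xs.getD (m+3) 0] := by
  apply List.ext_getElem
  · simp; omega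
  · intro i h1 h2
    simp only [List.length_take, List.length_drop] at h1
    have hi : i < 4 := by omega
    rw [List.getElem_take, List.getElem_drop]
    interval_cases i <;> simp [List.getD] <;> (rw [List.getElem?_eq_getElem (by omega)]; rfl)

lemma pv_steps_explicit (a b c d : Int) :
    (PySem.List.pyRange 1 4 1).map (fun j =>
        PySem.List.pyGetD ([a,b,c,d]) j 0 - PySem.List.pyGetD ([a,b,c,d]) (j-1) 0)
      = [b-a, c-b, d-c] := by
  have h : PySem.List.pyRange 1 4 1 = [1,2,3] := by decide
  rw [h]
  norm_num [PySem.List.pyGetD, PySem.List.pyGet?, PySem.List.pyIdx?, Int.toNat]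

lemma pv_e_getD (arr rew : List Int) (cN : Nat) (k : Nat) (hk1 : 1 ≤ k) (hk : k < cN) :
    (pvE arr rew (cN : Int)).getD k 0 = arr.getD k 0 - arr.getD (k-1) 0 := by
  have hlen : ((PySem.List.pyRange 1 (cN : Int) 1).map (fun i =>
      PySem.List.pyGetD arr i 0 - PySem.List.pyGetD arr (i - 1) 0)).length = cN - 1 := by
    simp [PySem.List.length_pyRange_one]
  have hk' : k - 1 < cN - 1 := by omega
  rw [pvE, show k = (k-1)+1 by omega, List.getD_cons_succ,
      List.getD_eq_getElem _ _ (by omega : k-1 < _)]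
  rw [List.getElem_map]
  rw [PySem.List.getElem_pyRange_one]
  have h1 : (1 : Int) + ((k : Nat) - 1 : Nat) = (k : Int) := by omega
  rw [h1]
  have h2 : (k : Int) - 1 = ((k - 1 : Nat) : Int) := by omega
  rw [h2, PySem.List.pyGetD_natCast, PySem.List.pyGetD_natCast]
  simp [show k-1+1 = k from by omega]

lemma pv_group_eq (arr rew : List Int) (cN : Nat) (hdvd : 4 ∣ cN) (hle : cN ≤ arr.length)
    (r : Int) (hr : r ∈ PySem.List.pyRange 0 (cN : Int) 4) :
    pvGroup arr rew r = PySem.List.slice (pvE arr rew (cN : Int)) (some r) (some (r + 4)) := by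
  rw [PySem.List.mem_pyRange_iff_of_pos (by norm_num)] at hr
  obtain ⟨h0, hlt, hdvdr⟩ := hr
  obtain ⟨m, hrm⟩ : ∃ m : Nat, r = (m : Int) := ⟨r.toNat, by omega⟩
  have hdm : 4 ∣ m := by
    have : (4 : Int) ∣ (m : Int) := by rw [← hrm]; simpa using hdvdr
    exact_mod_cast this
  have hmlt : m < cN := by omega
  have hm4 : m + 4 ≤ cN := by omega
  have hm4len : m + 4 ≤ arr.length := by omega
  have helen : (pvE arr rew (cN : Int)).length = cN := by
    simp [pvE, PySem.List.length_pyRange_one]; omega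
  have hsub : PySem.List.slice arr (some r) (some (r + 4))
      = [arr.getD m 0, arr.getD (m+1) 0, arr.getD (m+2) 0, arr.getD (m+3) 0] := by
    rw [hrm, show ((m : Int) + 4) = ((m : Int) + ((4:Nat) : Int)) from by norm_num,
        PySem.List.slice_natCast_add, pv_take4_drop arr m hm4len]
  have hslice : PySem.List.slice (pvE arr rew (cN : Int)) (some r) (some (r + 4))
      = [(pvE arr rew (cN : Int)).getD m 0, (pvE arr rew (cN : Int)).getD (m+1) 0,
         (pvE arr rew (cN : Int)).getD (m+2) 0, (pvE arr rew (cN : Int)).getD (m+3) 0] := by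
    rw [hrm, show ((m : Int) + 4) = ((m : Int) + ((4:Nat) : Int)) from by norm_num,
        PySem.List.slice_natCast_add, pv_take4_drop _ m (by omega)]
  rw [hslice]
  rw [pvGroup]
  simp only [hsub]
  rw [pv_steps_explicit]
  by_cases hz : m = 0
  · subst hz
    have hr0 : r = 0 := by omega
    simp only [hr0, if_neg (by omega : ¬(0 : Int) > 0)]
    rw [pv_e_getD arr rew cN 1 (by omega) (by omega),
        pv_e_getD arr rew cN 2 (by omega) (by omega),
        pv_e_getD arr rew cN 3 (by omega) (by omega)]
    simp [pvE]
  · have hrpos : r > 0 := by omega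
    simp only [if_neg (by omega : ¬ r = 0), if_pos hrpos]
    have hgm : PySem.List.pyGetD [arr.getD m 0, arr.getD (m+1) 0, arr.getD (m+2) 0, arr.getD (m+3) 0] 0 0
        = arr.getD m 0 := by simp [PySem.List.pyGetD, PySem.List.pyGet?, PySem.List.pyIdx?]
    rw [hgm]
    have hr1 : r - 1 = ((m - 1 : Nat) : Int) := by omega
    rw [hr1, PySem.List.pyGetD_natCast]
    rw [pv_e_getD arr rew cN m (by omega) (by omega),
        pv_e_getD arr rew cN (m+1) (by omega) (by omega),
        pv_e_getD arr rew cN (m+2) (by omega) (by omega),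
        pv_e_getD arr rew cN (m+3) (by omega) (by omega)]
    simp [show m+1-1 = m from rfl, show m+2-1 = m+1 from rfl, show m+3-1 = m+2 from rfl]

lemma pv_groups_eq (arr rew : List Int) (c : String) (st : PySem.Dict String (List (List Int)))
    (cN : Nat) (hdvd : 4 ∣ cN) (hle : cN ≤ arr.length) (hne : cN ≠ 0) :
    (PySem.List.pyRange 0 (cN : Int) 4).foldl
        (fun st r => st.modify c [] (fun l => l ++ [pvGroup arr rew r])) st
      = st.modify c [] (fun l => l ++ (PySem.List.pyRange 0 (cN : Int) 4).map
          (fun r => PySem.List.slice (pvE arr rew (cN : Int)) (some r) (some (r + 4)))) := by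
  have h0mem : (0 : Int) ∈ PySem.List.pyRange 0 (cN : Int) 4 := by
    rw [PySem.List.mem_pyRange_iff_of_pos (by norm_num)]
    refine ⟨le_refl _, by omega, by simp⟩
  rw [pv_foldl_modify c (fun r => pvGroup arr rew r) _ st (List.ne_nil_of_mem h0mem)]
  have hmap : (PySem.List.pyRange 0 (cN : Int) 4).map (fun r => pvGroup arr rew r)
      = (PySem.List.pyRange 0 (cN : Int) 4).map
          (fun r => PySem.List.slice (pvE arr rew (cN : Int)) (some r) (some (r + 4))) :=
    List.map_congr_left (fun r hr => pv_group_eq arr rew cN hdvd hle r hr)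
  rw [hmap]

lemma pv_inner_eq (arr rew : List Int) (c : String) (st : PySem.Dict String (List (List Int))) :
    (if PySem.Int.mod (arr.length : Int) 4 = 0 then
        (PySem.List.pyRange 0 (arr.length : Int) 4).foldl
          (fun s r => s.modify c [] (fun l => l ++ [pvGroup arr rew r])) st
      else if PySem.Int.mod (arr.length : Int) 4 > 0 then
        (PySem.List.pyRange 0 ((arr.length : Int) - PySem.Int.mod (arr.length : Int) 4) 4).foldl
          (fun s r => s.modify c [] (fun l => l ++ [pvGroup arr rew r])) st
      else st)
    = (if ((arr.length : Int) - PySem.Int.mod (arr.length : Int) 4) ≠ 0 then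
        st.modify c [] (fun l =>
          l ++ (PySem.List.pyRange 0 ((arr.length : Int) - PySem.Int.mod (arr.length : Int) 4) 4).map
            (fun r => PySem.List.slice (pvE arr rew ((arr.length : Int) - PySem.Int.mod (arr.length : Int) 4)) (some r) (some (r + 4))))
      else st) := by
  have hmod : PySem.Int.mod (arr.length : Int) 4 = (arr.length : Int) % 4 :=
    PySem.Int.mod_eq_emod_of_pos (by norm_num)
  simp only [hmod]
  obtain ⟨cN, hcN⟩ : ∃ cn, cn = arr.length - arr.length % 4 := ⟨_, rfl⟩
  have hc : (arr.length : Int) - (arr.length : Int) % 4 = (cN : Int) := by omega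
  simp only [hc]
  by_cases h0 : arr.length % 4 = 0
  · rw [if_pos (by omega : ((arr.length : Int)) % 4 = 0)]
    rw [show ((arr.length : Nat) : Int) = (cN : Int) from by omega]
    by_cases hz : cN = 0
    · subst hz
      rw [show PySem.List.pyRange 0 ((0 : Nat) : Int) 4 = [] from by decide]
      simp
    · rw [pv_groups_eq arr rew c st cN (by omega) (by omega) hz,
          if_pos (by exact_mod_cast hz)]
  · rw [if_neg (by omega : ¬ ((arr.length : Int)) % 4 = 0), if_pos (by omega)]
    by_cases hz : cN = 0
    · subst hz
      rw [show PySem.List.pyRange 0 ((0 : Nat) : Int) 4 = [] from by decide]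
      simp
    · rw [pv_groups_eq arr rew c st cN (by omega) (by omega) hz,
          if_pos (by exact_mod_cast hz)]

lemma pv_step_eq (subpath_after_steps rew_index : List (String × List Int))
    (s : PySem.Dict String (List (List Int)) × PySem.Dict String (List (List Int))) (config : String) :
    (let rlD := s.1.insert config
        ((PySem.List.slice (s.1.getD config []) (some 0) (some 4)).map (fun sub => sub.map (fun v => v)))
     let arr := (PySem.Dict.mk subpath_after_steps).getD config []
     let n : Int := arr.length
     let stD :=
        if PySem.Int.mod n 4 = 0 then
          (PySem.List.pyRange 0 n 4).foldl
            (fun st r =>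
              let subpath := PySem.List.slice arr (some r) (some (r + 4))
              let steps := (PySem.List.pyRange 1 4 1).map (fun j =>
                PySem.List.pyGetD subpath j 0 - PySem.List.pyGetD subpath (j - 1) 0)
              let steps := if r = 0 then PySem.List.pyGetD ((PySem.Dict.mk rew_index).getD config []) r 0 :: steps else steps
              let steps := if r > 0 then (PySem.List.pyGetD subpath 0 0 - PySem.List.pyGetD arr (r - 1) 0) :: steps else steps
              st.modify config [] (fun l => l ++ [steps])) s.2
        else if PySem.Int.mod n 4 > 0 then
          (PySem.List.pyRange 0 (n - PySem.Int.mod n 4) 4).foldl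
            (fun st r =>
              let subpath := PySem.List.slice arr (some r) (some (r + 4))
              let steps := (PySem.List.pyRange 1 4 1).map (fun j =>
                PySem.List.pyGetD subpath j 0 - PySem.List.pyGetD subpath (j - 1) 0)
              let steps := if r = 0 then PySem.List.pyGetD ((PySem.Dict.mk rew_index).getD config []) r 0 :: steps else steps
              let steps := if r > 0 then (PySem.List.pyGetD subpath 0 0 - PySem.List.pyGetD arr (r - 1) 0) :: steps else steps
              st.modify config [] (fun l => l ++ [steps])) s.2
        else s.2
     (rlD, stD))
    = (let rlD := s.1.insert config
        ((PySem.List.slice (s.1.getD config []) (some 0) (some 4)).map (fun sub => sub.map (fun v => v)))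
       let arr := (PySem.Dict.mk subpath_after_steps).getD config []
       let completed : Int := (arr.length : Int) - PySem.Int.mod (arr.length : Int) 4
       let stD :=
        if completed ≠ 0 then
          let e := PySem.List.pyGetD ((PySem.Dict.mk rew_index).getD config []) 0 0 ::
            (PySem.List.pyRange 1 completed 1).map (fun i =>
              PySem.List.pyGetD arr i 0 - PySem.List.pyGetD arr (i - 1) 0)
          s.2.modify config [] (fun l =>
            l ++ (PySem.List.pyRange 0 completed 4).map (fun r => PySem.List.slice e (some r) (some (r + 4))))
        else s.2
       (rlD, stD)) := by
  exact congrArg (Prod.mk _)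
    (pv_inner_eq ((PySem.Dict.mk subpath_after_steps).getD config [])
      ((PySem.Dict.mk rew_index).getD config []) config s.2)

-- ===== VERDICT (by name: the statement is the Claim_ definition above) =====
theorem subpath_files_spec : Claim_equal_subpath_files := by
  intro configs subpath_after_steps rew_list rew_index steps_subpath_alltasks _ _
  unfold Spec_subpath_files subpath_files subpath_files_alt
  exact congrArg
    (fun (d : PySem.Dict String (List (List Int)) × PySem.Dict String (List (List Int))) => d.2.items)
    (PySem.List.foldl_congr_mem _ _ _ _ (fun acc x _ => pv_step_eq subpath_after_steps rew_index acc x))
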